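-- pv_equiv track=rewrite | github.com/EnzoSpinelli/algorithms | 1.PrimeiraQuestao_SearchWord/teste2.py | suggestword
-- ===== SOURCE A (Python) =====
-- def lower_bound(arr, target):
--   st, en=0, len(arr)
--   while st < en:
--     mid = (st + en)//2
--     if arr[mid] < target:
--      st = mid + 1
--     else:
--      en = mid
--   return st
--
-- def suggestword (products, searchWord):
--   products.sort()
--   result = []
--   prefix = ""
--
--   for char in searchWord:
--     prefix += char
--
--     i = lower_bound(products, prefix)
--     suggest = []
--
--     for k in range (i, min(i + 3, len(products))):
--       if products[k].startswith(prefix):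
--         suggest.append(products[k])
--       else:
--         break
--     result.append(suggest)
--   return result
-- ===== SOURCE B (Python) =====
-- def suggestword(products, searchWord):
--     products.sort()
--     result = []
--     prefix = ""
--     for char in searchWord:
--         prefix += char
--         suggest = []
--         for p in products:
--             if p.startswith(prefix):
--                 suggest.append(p)
--                 if len(suggest) == 3:
--                     break
--         result.append(suggest)
--     return result
-- ===== Notes on version B (the rewrite author's own statement) =====
-- stated objective: simpler
-- what changed: Dropped the lower_bound binary-search helper and the bounded index window; for each prefix B linearly scans the sorted list collecting startswith-matches and stops at 3, which yields the same suggestions because matches are contiguous in sorted order.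
import Mathlib
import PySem

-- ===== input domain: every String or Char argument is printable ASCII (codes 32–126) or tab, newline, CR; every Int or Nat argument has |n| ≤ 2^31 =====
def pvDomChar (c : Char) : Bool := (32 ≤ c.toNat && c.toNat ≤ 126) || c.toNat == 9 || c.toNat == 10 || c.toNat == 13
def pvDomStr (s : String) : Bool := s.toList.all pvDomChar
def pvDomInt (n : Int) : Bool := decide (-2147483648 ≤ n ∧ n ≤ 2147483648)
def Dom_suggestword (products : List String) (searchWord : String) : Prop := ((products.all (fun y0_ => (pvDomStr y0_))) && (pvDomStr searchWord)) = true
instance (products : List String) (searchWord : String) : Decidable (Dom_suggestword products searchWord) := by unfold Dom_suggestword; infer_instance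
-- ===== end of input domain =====

-- B drops the lower_bound binary search: per prefix it linearly collects up to 3 startswith-matches
-- from the sorted list (simpler). Both Pythons sort `products` in place; equivalence is about the
-- return value (B performs the same mutation).

-- ===== PORT A =====
-- while st < en: mid = (st+en)//2; if arr[mid] < target: st = mid+1 else: en = mid
def lbLoop (arr : List String) (target : String) (st en : Nat) : Nat :=
  if _h : st < en then
    if PySem.List.pyGetD arr (((st + en) / 2 : Nat) : Int) "" < target then
      lbLoop arr target ((st + en) / 2 + 1) en
    else
      lbLoop arr target st ((st + en) / 2)
  else st
termination_by en - st
decreasing_by all_goals omega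

def lower_bound (arr : List String) (target : String) : Nat :=
  lbLoop arr target 0 arr.length

-- inner `for k in range(i, min(i+3, len)): if startswith: append else: break`
def suggestA_inner (products : List String) (pfix : List Char) : List Nat → List String
  | [] => []
  | k :: rest =>
    if PySem.Str.startswith (PySem.List.pyGetD products (k : Int) "") (String.ofList pfix) then
      PySem.List.pyGetD products (k : Int) "" :: suggestA_inner products pfix rest
    else []

def suggestword (products : List String) (searchWord : String) : List (List String) :=
  let ps := PySem.List.sorted products (fun x => x)
  (searchWord.toList.foldl
    (fun (st : List Char × List (List String)) c =>
      let pfix := st.1 ++ [c]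
      let i := lower_bound ps (String.ofList pfix)
      let suggest := suggestA_inner ps pfix (List.range' i (min (i + 3) ps.length - i))
      (pfix, st.2 ++ [suggest]))
    ([], [])).2

-- ===== PORT B =====
-- `for p in products: if p.startswith(pfix): suggest.append(p); if len(suggest)==3: break`
def scanB (pfix : List Char) : List String → List String → List String
  | [], acc => acc
  | p :: rest, acc =>
    if PySem.Str.startswith p (String.ofList pfix) then
      if (acc ++ [p]).length == 3 then acc ++ [p]
      else scanB pfix rest (acc ++ [p])
    else scanB pfix rest acc

def suggestword_alt (products : List String) (searchWord : String) : List (List String) :=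
  let ps := PySem.List.sorted products (fun x => x)
  (searchWord.toList.foldl
    (fun (st : List Char × List (List String)) c =>
      let pfix := st.1 ++ [c]
      (pfix, st.2 ++ [scanB pfix ps []]))
    ([], [])).2

-- ===== PRECONDITION & SPEC =====
def Spec_suggestword (products : List String) (searchWord : String) (out : List (List String)) : Prop := out = suggestword_alt products searchWord
instance (products : List String) (searchWord : String) (out : List (List String)) : Decidable (Spec_suggestword products searchWord out) := by unfold Spec_suggestword; infer_instance

-- ===== CLAIM (what is proved, stated in full; the proofs are below) =====
def Claim_equal_suggestword : Prop := ∀ (products : List String) (searchWord : String), Dom_suggestword products searchWord → Spec_suggestword products searchWord (suggestword products searchWord)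

-- ===== LEMMAS AND PROOFS =====

-- the match predicate
def pvP (pfix : List Char) (p : String) : Bool := PySem.Chars.startswith p.toList pfix

-- a list cannot be lexicographically below one of its prefixes
lemma pv_not_lex (u : List Char) : ∀ s, u <+: s → ¬ List.Lex (· < ·) s u := by
  induction u with
  | nil => intro s _ h; cases h
  | cons a u' ih =>
    intro s hp h
    obtain ⟨r, rfl⟩ := hp
    cases h with
    | rel hab => exact absurd hab (lt_irrefl a)
    | cons h' => exact ih (u' ++ r) ⟨r, rfl⟩ h'

-- a prefix of a string is ≤ it
lemma pv_prefix_le (u : List Char) (s : String) (h : u <+: s.toList) : String.ofList u ≤ s := by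
  rw [String.le_iff_toList_le, String.toList_ofList]
  exact not_lt.1 (fun hlt => pv_not_lex u s.toList h ((List.lt_iff_lex_lt _ _).1 hlt))

lemma pv_sep_aux : ∀ (u t s : List Char), ¬ List.Lex (· < ·) t u → ¬ u <+: t → u <+: s →
    List.Lex (· < ·) s t := by
  intro u
  induction u with
  | nil => intro t s _ hnp _; exact absurd List.nil_prefix hnp
  | cons a u' ih =>
    intro t s hnl hnp hp
    obtain ⟨r, rfl⟩ := hp
    match t with
    | [] => exact absurd List.Lex.nil hnl
    | b :: t' =>
      rcases lt_trichotomy a b with hab | rfl | hba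
      · exact List.Lex.rel hab
      · have h1 : ¬ List.Lex (· < ·) t' u' := fun h => hnl (List.Lex.cons h)
        have h2 : ¬ u' <+: t' := fun h => hnp (List.cons_prefix_cons.2 ⟨rfl, h⟩)
        exact List.Lex.cons (ih t' (u' ++ r) h1 h2 ⟨r, rfl⟩)
      · exact absurd (List.Lex.rel hba) hnl

-- a string ≥ u that does not extend u is above every string extending u
lemma pv_sep (u : List Char) (t s : String) (hle : String.ofList u ≤ t)
    (hnp : ¬ u <+: t.toList) (hp : u <+: s.toList) : s < t := by
  rw [String.le_iff_toList_le, String.toList_ofList] at hle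
  rw [String.lt_iff_toList_lt]
  refine (List.lt_iff_lex_lt _ _).2 (pv_sep_aux u t.toList s.toList (fun h => ?_) hnp hp)
  exact absurd ((List.lt_iff_lex_lt _ _).2 h) (not_lt_of_ge hle)

-- lbLoop invariant on a sorted list
lemma pv_lbLoop_spec (ps : List String) (t : String)
    (hs : List.Pairwise (fun a b => a ≤ b) ps) :
    ∀ n st en, en - st ≤ n → en ≤ ps.length → st ≤ en →
      st ≤ lbLoop ps t st en ∧ lbLoop ps t st en ≤ en ∧
      (∀ j (_ : j < ps.length), st ≤ j → j < lbLoop ps t st en → ps[j] < t) ∧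
      (∀ j (_ : j < ps.length), lbLoop ps t st en ≤ j → j < en → t ≤ ps[j]) := by
  have hm : ∀ (i j : Nat) (hi : i < ps.length) (hj : j < ps.length), i ≤ j → ps[i] ≤ ps[j] := by
    intro i j hi hj hij
    rcases eq_or_lt_of_le hij with h | h
    · subst h; exact le_refl _
    · exact (List.pairwise_iff_getElem.1 hs) i j hi hj h
  intro n
  induction n with
  | zero =>
    intro st en h1 h2 h3
    have hse : st = en := by omega
    rw [lbLoop, dif_neg (by omega : ¬ st < en)]
    exact ⟨le_refl _, h3, fun j _ hj1 hj2 => by omega, fun j _ hj1 hj2 => by omega⟩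
  | succ n ih =>
    intro st en h1 h2 h3
    by_cases h : st < en
    · rw [lbLoop, dif_pos h]
      have hmlen : (st + en) / 2 < ps.length := by omega
      have hget : PySem.List.pyGetD ps (((st + en) / 2 : Nat) : Int) "" = ps[(st + en) / 2] := by
        rw [PySem.List.pyGetD_natCast, List.getD_eq_getElem ps "" hmlen]
      by_cases hc : ps[(st + en) / 2] < t
      · rw [if_pos (hget ▸ hc)]
        obtain ⟨r1, r2, r3, r4⟩ := ih ((st + en) / 2 + 1) en (by omega) h2 (by omega)
        refine ⟨by omega, r2, ?_, r4⟩
        intro j hj hj1 hj2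
        by_cases hjm : j ≤ (st + en) / 2
        · exact lt_of_le_of_lt (hm j ((st + en) / 2) hj hmlen hjm) hc
        · exact r3 j hj (by omega) hj2
      · rw [if_neg (hget ▸ hc)]
        obtain ⟨r1, r2, r3, r4⟩ := ih st ((st + en) / 2) (by omega) (by omega) (by omega)
        refine ⟨r1, by omega, r3, ?_⟩
        intro j hj hj1 hj2
        by_cases hjm : (st + en) / 2 ≤ j
        · exact le_trans (not_lt.1 hc) (hm ((st + en) / 2) j hmlen hj hjm)
        · exact r4 j hj hj1 (by omega)
    · rw [lbLoop, dif_neg h]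
      exact ⟨le_refl _, h3, fun j _ hj1 hj2 => by omega, fun j _ hj1 hj2 => by omega⟩

lemma pv_lower_bound_spec (ps : List String) (t : String)
    (hs : List.Pairwise (fun a b => a ≤ b) ps) :
    lower_bound ps t ≤ ps.length ∧
    (∀ j (_ : j < ps.length), j < lower_bound ps t → ps[j] < t) ∧
    (∀ j (_ : j < ps.length), lower_bound ps t ≤ j → t ≤ ps[j]) := by
  obtain ⟨r1, r2, r3, r4⟩ := pv_lbLoop_spec ps t hs ps.length 0 ps.length (by omega) (le_refl _)
    (by omega)
  exact ⟨r2, fun j hj hj2 => r3 j hj (by omega) hj2, fun j hj hj1 => r4 j hj hj1 hj⟩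

-- B's scan collects the first (3 - |acc|) matches
lemma pv_scanB_eq (pfix : List Char) :
    ∀ (ps acc : List String), acc.length < 3 →
      scanB pfix ps acc = acc ++ ((ps.filter (pvP pfix)).take (3 - acc.length)) := by
  intro ps
  induction ps with
  | nil => intro acc _; simp [scanB]
  | cons p rest ih =>
    intro acc hacc
    have hsw : PySem.Str.startswith p (String.ofList pfix) = pvP pfix p := by
      simp [PySem.Str.startswith_eq, pvP]
    rw [scanB, hsw]
    by_cases hp : pvP pfix p
    · rw [if_pos hp]
      by_cases h3 : acc.length = 2
      · rw [if_pos (by simp [h3])]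
        simp [hp, h3]
      · rw [if_neg (by simp; omega)]
        rw [ih (acc ++ [p]) (by simp; omega)]
        have : 3 - acc.length = (3 - (acc ++ [p]).length) + 1 := by simp; omega
        simp only [List.filter_cons, hp, if_pos, this, List.take_succ_cons, List.append_assoc,
          List.cons_append, List.nil_append]
    · rw [if_neg (by simp [hp])]
      rw [ih acc hacc]
      simp [hp]

-- takeWhile of a take is take of takeWhile
lemma pv_takeWhile_take {α : Type} (p : α → Bool) :
    ∀ (n : Nat) (l : List α), (l.take n).takeWhile p = (l.takeWhile p).take n := by
  intro n
  induction n with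
  | zero => intro l; simp
  | succ n ih =>
    intro l
    cases l with
    | nil => simp
    | cons x l' =>
      rw [List.take_succ_cons, List.takeWhile_cons, List.takeWhile_cons]
      by_cases h : p x
      · simp only [h, if_pos, List.take_succ_cons, ih]
      · simp [h]

-- on a sorted tail all of whose elements are ≥ the prefix string, filter = takeWhile
lemma pv_filter_eq_takeWhile (pfix : List Char) :
    ∀ (l : List String), List.Pairwise (fun a b => a ≤ b) l →
      (∀ x ∈ l, String.ofList pfix ≤ x) →
      l.filter (pvP pfix) = l.takeWhile (pvP pfix) := by
  intro l
  induction l with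
  | nil => intro _ _; simp
  | cons x l' ih =>
    intro hpw hall
    obtain ⟨hx, hpw'⟩ := List.pairwise_cons.1 hpw
    by_cases h : pvP pfix x
    · rw [List.filter_cons, if_pos (by simp [h]), List.takeWhile_cons, if_pos h]
      rw [ih hpw' (fun y hy => hall y (List.mem_cons_of_mem x hy))]
    · rw [List.filter_cons, if_neg (by simp [h]), List.takeWhile_cons, if_neg (by simp [h])]
      refine List.filter_eq_nil_iff.2 ?_
      intro y hy hpy
      have hylt : y < x := pv_sep pfix x y (hall x List.mem_cons_self)
        (fun hc => h ((PySem.Chars.startswith_iff _ _).2 hc))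
        ((PySem.Chars.startswith_iff _ _).1 hpy)
      exact absurd hylt (not_lt_of_ge (hx y hy))

-- A's window scan is takeWhile over the corresponding slice
lemma pv_inner_eq (ps : List String) (pfix : List Char) :
    ∀ (m i : Nat), i + m ≤ ps.length →
      suggestA_inner ps pfix (List.range' i m) = ((ps.drop i).take m).takeWhile (pvP pfix) := by
  intro m
  induction m with
  | zero => intro i _; simp [suggestA_inner]
  | succ m ih =>
    intro i hlen
    have hi : i < ps.length := by omega
    rw [List.range'_succ, List.drop_eq_getElem_cons hi, List.take_succ_cons, List.takeWhile_cons]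
    have hget : PySem.List.pyGetD ps (i : Int) "" = ps[i] := by
      rw [PySem.List.pyGetD_natCast, List.getD_eq_getElem ps "" hi]
    have hsw : PySem.Str.startswith (PySem.List.pyGetD ps (i : Int) "") (String.ofList pfix)
        = pvP pfix ps[i] := by
      rw [hget]; simp [PySem.Str.startswith_eq, pvP]
    rw [suggestA_inner, hsw]
    by_cases h : pvP pfix ps[i]
    · rw [if_pos h, if_pos h, hget, ih (i + 1) (by omega)]
    · rw [if_neg h, if_neg h]

-- takeWhile never lengthens a list
lemma pv_takeWhile_len_le (p : String → Bool) : ∀ (l : List String), (l.takeWhile p).length ≤ l.length := by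
  intro l
  induction l with
  | nil => simp
  | cons x l ih =>
    rw [List.takeWhile_cons]
    by_cases h : p x
    · simp only [h, if_pos, List.length_cons]; omega
    · simp [h]

-- per-prefix equality on a sorted list
lemma pv_main (ps : List String) (pfix : List Char)
    (hs : List.Pairwise (fun a b => a ≤ b) ps) :
    suggestA_inner ps pfix
        (List.range' (lower_bound ps (String.ofList pfix))
          (min (lower_bound ps (String.ofList pfix) + 3) ps.length - lower_bound ps (String.ofList pfix)))
      = scanB pfix ps [] := by
  obtain ⟨hlen, hlt, hge⟩ := pv_lower_bound_spec ps (String.ofList pfix) hs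
  set i := lower_bound ps (String.ofList pfix) with hidef
  set m := min (i + 3) ps.length - i with hmdef
  have him : i + m ≤ ps.length := by omega
  rw [pv_inner_eq ps pfix m i him, pv_takeWhile_take]
  rw [pv_scanB_eq pfix ps [] (by simp), List.nil_append]
  simp only [List.length_nil, Nat.sub_zero]
  have hsplit : ps.filter (pvP pfix) = (ps.drop i).filter (pvP pfix) := by
    conv_lhs => rw [← List.take_append_drop i ps]
    rw [List.filter_append, List.filter_eq_nil_iff.2, List.nil_append]
    intro y hy
    obtain ⟨j, hj, hjy⟩ := List.mem_iff_getElem.1 hy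
    have hjlt : j < i := by
      have := List.length_take_le i ps
      have := hj
      simp at this
      omega
    have hjps : j < ps.length := by omega
    have : y = ps[j] := by rw [← hjy]; exact (List.getElem_take)
    subst this
    intro hpy
    have h1 : String.ofList pfix ≤ ps[j] :=
      pv_prefix_le pfix ps[j] ((PySem.Chars.startswith_iff _ _).1 hpy)
    exact absurd (hlt j hjps hjlt) (not_lt_of_ge h1)
  have hdropsorted : List.Pairwise (fun a b : String => a ≤ b) (ps.drop i) := hs.drop
  have hdropge : ∀ x ∈ ps.drop i, String.ofList pfix ≤ x := by
    intro x hx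
    obtain ⟨j, hj, hjx⟩ := List.mem_iff_getElem.1 hx
    have hjlen : i + j < ps.length := by
      have := hj; simp at this; omega
    have : x = ps[i + j] := by rw [← hjx]; simp
    subst this
    exact hge (i + j) hjlen (by omega)
  rw [hsplit, pv_filter_eq_takeWhile pfix (ps.drop i) hdropsorted hdropge]
  have hlen' : (ps.drop i).length = ps.length - i := by simp
  by_cases h3 : 3 ≤ ps.length - i
  · have : m = 3 := by omega
    rw [this]
  · have hm3 : m = ps.length - i := by omega
    have htw : ((ps.drop i).takeWhile (pvP pfix)).length ≤ ps.length - i := by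
      have := pv_takeWhile_len_le (pvP pfix) (ps.drop i)
      omega
    rw [List.take_of_length_le (by omega), List.take_of_length_le (by omega)]

-- ===== VERDICT (by name: the statement is the Claim_ definition above) =====
theorem suggestword_spec : Claim_equal_suggestword := by
  intro products searchWord _
  unfold Spec_suggestword suggestword suggestword_alt
  have hs := PySem.List.sorted_pairwise products (fun x => x)
  set ps := PySem.List.sorted products (fun x => x) with hps
  have key : ∀ (cs : List Char) (pfx : List Char) (acc : List (List String)),
      (cs.foldl (fun (st : List Char × List (List String)) c =>
        let pfix := st.1 ++ [c]
        let i := lower_bound ps (String.ofList pfix)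
        let suggest := suggestA_inner ps pfix (List.range' i (min (i + 3) ps.length - i))
        (pfix, st.2 ++ [suggest])) (pfx, acc)).2
      = (cs.foldl (fun (st : List Char × List (List String)) c =>
        let pfix := st.1 ++ [c]
        (pfix, st.2 ++ [scanB pfix ps []])) (pfx, acc)).2 := by
    intro cs
    induction cs with
    | nil => intro pfx acc; rfl
    | cons c cs ih =>
      intro pfx acc
      simp only [List.foldl_cons]
      rw [pv_main ps (pfx ++ [c]) hs]
      exact ih (pfx ++ [c]) (acc ++ [scanB (pfx ++ [c]) ps []])
  exact key searchWord.toList [] []
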